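-- pv_equiv track=rewrite | github.com/h3artfield/playlist | binge_schedule/show_swap.py | replace_cell_show_text
-- ===== SOURCE A (Python) =====
-- def replace_cell_show_text(text: str, old_labels: list[str], new_display: str) -> str:
--     """Match grid cell text to ``resolve_show``-style rules: exact name, then longest-prefix among ``old_labels``."""
--     olds = sorted({str(o).strip() for o in old_labels if o and str(o).strip()}, key=len, reverse=True)
--     if not olds:
--         return text
--     s = str(text)
--     for old in olds:
--         if s == old:
--             return new_display
--     for old in olds:
--         if s.startswith(old):
--             return new_display + s[len(old) :]
--     return text
-- ===== SOURCE B (Python) =====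
-- def replace_cell_show_text(text: str, old_labels: list[str], new_display: str) -> str:
--     """Single pass: track the longest stripped label that is a prefix of the text
--     (an exact match is just a prefix whose suffix is empty); no set, no sort."""
--     s = str(text)
--     best = None
--     for o in old_labels:
--         t = str(o).strip()
--         if t and s.startswith(t) and (best is None or len(t) > len(best)):
--             best = t
--     if best is None:
--         return text
--     return new_display + s[len(best):]
-- ===== Notes on version B (the rewrite author's own statement) =====
-- stated objective: simpler
-- what changed: Replaces the dedup-set + length-sort + two sequential scan loops (exact match, then prefix match) by one pass over the raw labels that tracks the longest stripped label prefixing the text; the exact-match case falls out as a prefix with empty suffix.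
import Mathlib
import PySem

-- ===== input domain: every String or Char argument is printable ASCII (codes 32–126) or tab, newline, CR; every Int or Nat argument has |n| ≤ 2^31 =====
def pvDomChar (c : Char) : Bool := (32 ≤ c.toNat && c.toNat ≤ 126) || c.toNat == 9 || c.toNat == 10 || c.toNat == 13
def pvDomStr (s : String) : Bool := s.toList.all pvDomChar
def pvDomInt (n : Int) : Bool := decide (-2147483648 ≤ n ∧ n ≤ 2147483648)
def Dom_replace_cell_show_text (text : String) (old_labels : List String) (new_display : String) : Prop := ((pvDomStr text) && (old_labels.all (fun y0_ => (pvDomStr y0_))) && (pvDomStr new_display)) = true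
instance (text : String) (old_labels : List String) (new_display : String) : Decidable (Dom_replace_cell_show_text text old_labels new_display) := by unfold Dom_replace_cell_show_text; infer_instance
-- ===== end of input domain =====

-- B replaces A's dedup-set + length-sort + two scan loops by ONE pass tracking the longest
-- stripped label that is a prefix of the text (objective: simpler).

-- ===== PORT A =====
-- olds = sorted({str(o).strip() for o in old_labels if o and str(o).strip()}, key=len, reverse=True)
def pvOlds (old_labels : List String) : List String :=
  PySem.List.sorted
    (PySem.Set.ofList
      ((old_labels.filter (fun o => (o != "") && (PySem.Str.strip o != ""))).map
        (fun o => PySem.Str.strip o)))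
    (fun t => PySem.Str.len t) true

-- 'for old in olds: if s == old: return new_display'
def pvAExact (s nd : String) : List String → Option String
  | [] => none
  | old :: rest => if s = old then some nd else pvAExact s nd rest

-- 'for old in olds: if s.startswith(old): return new_display + s[len(old):]'
-- (string concatenation is done on the code-point lists: Lean's String.append is kernel-opaque)
def pvAPrefix (s nd : String) : List String → Option String
  | [] => none
  | old :: rest =>
      if PySem.Str.startswith s old then
        some (String.ofList (nd.toList ++ (PySem.Str.slice s (some (PySem.Str.len old)) none).toList))
      else pvAPrefix s nd rest

def replace_cell_show_text (text : String) (old_labels : List String) (new_display : String) : String :=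
  let olds := pvOlds old_labels
  if olds = [] then text
  else
    let s := text
    match pvAExact s new_display olds with
    | some r => r
    | none =>
      match pvAPrefix s new_display olds with
      | some r => r
      | none => text

-- ===== PORT B =====
-- loop body: t = str(o).strip(); if t and s.startswith(t) and (best is None or len(t) > len(best)): best = t
def pvBStep (s : String) (best : Option String) (o : String) : Option String :=
  let t := PySem.Str.strip o
  if (t != "") && PySem.Str.startswith s t
       && (match best with | none => true | some b => decide (PySem.Str.len b < PySem.Str.len t))
  then some t else best

-- return new_display + s[len(best):]  (len(best) ≥ 0, so the slice is a drop of the code-point list)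
def replace_cell_show_text_alt (text : String) (old_labels : List String) (new_display : String) : String :=
  let s := text
  match old_labels.foldl (pvBStep s) none with
  | none => text
  | some b => String.ofList (new_display.toList ++ s.toList.drop b.toList.length)

-- ===== PRECONDITION & SPEC =====
def Spec_replace_cell_show_text (text : String) (old_labels : List String) (new_display : String) (out : String) : Prop := out = replace_cell_show_text_alt text old_labels new_display
instance (text : String) (old_labels : List String) (new_display : String) (out : String) : Decidable (Spec_replace_cell_show_text text old_labels new_display out) := by unfold Spec_replace_cell_show_text; infer_instance

-- ===== CLAIM (what is proved, stated in full; the proofs are below) =====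
def Claim_equal_replace_cell_show_text : Prop := ∀ (text : String) (old_labels : List String) (new_display : String), Dom_replace_cell_show_text text old_labels new_display → Spec_replace_cell_show_text text old_labels new_display (replace_cell_show_text text old_labels new_display)

-- ===== LEMMAS AND PROOFS =====

-- a "candidate": a nonempty stripped label that is a prefix of the text
def pvCand (s t : String) : Prop := t ≠ "" ∧ t.toList <+: s.toList

theorem pvStrip_empty : PySem.Str.strip "" = "" := by decide

theorem mem_pvOlds (ol : List String) (t : String) :
    t ∈ pvOlds ol ↔ ∃ o ∈ ol, (o ≠ "" ∧ PySem.Str.strip o ≠ "") ∧ t = PySem.Str.strip o := by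
  constructor
  · intro h
    simp only [pvOlds, PySem.List.mem_sorted, PySem.Set.mem_ofList, List.mem_map, List.mem_filter,
      Bool.and_eq_true, bne_iff_ne, ne_eq] at h
    obtain ⟨o, ⟨ho, h1, h2⟩, ht⟩ := h
    exact ⟨o, ho, ⟨h1, h2⟩, ht.symm⟩
  · rintro ⟨o, ho, ⟨h1, h2⟩, rfl⟩
    simp only [pvOlds, PySem.List.mem_sorted, PySem.Set.mem_ofList, List.mem_map, List.mem_filter,
      Bool.and_eq_true, bne_iff_ne, ne_eq]
    exact ⟨o, ⟨ho, h1, h2⟩, rfl⟩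

theorem mem_pvOlds_of_cand (text : String) (ol : List String) (o : String)
    (ho : o ∈ ol) (hc : pvCand text (PySem.Str.strip o)) : PySem.Str.strip o ∈ pvOlds ol :=
  (mem_pvOlds ol _).mpr ⟨o, ho, ⟨fun h => hc.1 (h ▸ pvStrip_empty), hc.1⟩, rfl⟩

theorem pvOlds_pairwise (ol : List String) :
    (pvOlds ol).Pairwise (fun a b => PySem.Str.len b ≤ PySem.Str.len a) :=
  PySem.List.sorted_pairwise_rev _ _

theorem pvAExact_none (s nd : String) (l : List String) (h : s ∉ l) :
    pvAExact s nd l = none := by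
  induction l with
  | nil => rfl
  | cons a rest ih =>
    simp only [List.mem_cons, not_or] at h
    simp [pvAExact, h.1, ih h.2]

theorem pvAExact_some (s nd : String) (l : List String) (h : s ∈ l) :
    pvAExact s nd l = some nd := by
  induction l with
  | nil => simp at h
  | cons a rest ih =>
    by_cases hs : s = a
    · simp [pvAExact, hs]
    · rcases List.mem_cons.mp h with h' | h'
      · exact absurd h' hs
      · simp [pvAExact, hs, ih h']

theorem pvSlice_drop (s old : String) :
    (PySem.Str.slice s (some (PySem.Str.len old)) none).toList = s.toList.drop old.toList.length := by
  simp [PySem.Str.toList_slice, PySem.Str.len_eq, PySem.List.slice_from_natCast]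

theorem pvAPrefix_none (s nd : String) (l : List String)
    (h : ∀ old ∈ l, ¬ old.toList <+: s.toList) :
    pvAPrefix s nd l = none := by
  induction l with
  | nil => rfl
  | cons a rest ih =>
    have ha : ¬ PySem.Str.startswith s a = true := by
      rw [PySem.Str.startswith_eq, PySem.Chars.startswith_iff]
      exact h a (List.mem_cons_self ..)
    simp only [pvAPrefix, ha]
    exact ih (fun old ho => h old (List.mem_cons_of_mem _ ho))

theorem pvAPrefix_char (s nd : String) (l : List String)
    (hp : l.Pairwise (fun a b => PySem.Str.len b ≤ PySem.Str.len a))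
    (hex : ∃ old ∈ l, old.toList <+: s.toList) :
    ∃ old ∈ l, old.toList <+: s.toList ∧
      (∀ y ∈ l, y.toList <+: s.toList → y.toList.length ≤ old.toList.length) ∧
      pvAPrefix s nd l = some (String.ofList (nd.toList ++ s.toList.drop old.toList.length)) := by
  induction l with
  | nil => simp at hex
  | cons a rest ih =>
    rcases List.pairwise_cons.mp hp with ⟨hpa, hprest⟩
    by_cases ha : a.toList <+: s.toList
    · refine ⟨a, List.mem_cons_self .., ha, ?_, ?_⟩
      · intro y hy _
        rcases List.mem_cons.mp hy with rfl | hy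
        · exact le_refl _
        · have := hpa y hy
          simp only [PySem.Str.len_eq, Nat.cast_le] at this
          exact this
      · have ha' : PySem.Str.startswith s a = true := by
          rw [PySem.Str.startswith_eq, PySem.Chars.startswith_iff]; exact ha
        simp only [pvAPrefix, ha', if_true, pvSlice_drop]
    · have hex' : ∃ old ∈ rest, old.toList <+: s.toList := by
        rcases hex with ⟨old, ho, hpre⟩
        rcases List.mem_cons.mp ho with rfl | ho
        · exact absurd hpre ha
        · exact ⟨old, ho, hpre⟩
      obtain ⟨old, ho, hpre, hmax, heq⟩ := ih hprest hex'
      have ha' : ¬ PySem.Str.startswith s a = true := by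
        rw [PySem.Str.startswith_eq, PySem.Chars.startswith_iff]; exact ha
      refine ⟨old, List.mem_cons_of_mem _ ho, hpre, ?_, ?_⟩
      · intro y hy hpy
        rcases List.mem_cons.mp hy with rfl | hy
        · exact absurd hpy ha
        · exact hmax y hy hpy
      · simp only [pvAPrefix, ha']; exact heq

theorem pvBStep_cases (s : String) (b : Option String) (o : String) :
    (pvBStep s b o = some (PySem.Str.strip o) ∧ pvCand s (PySem.Str.strip o)
       ∧ (∀ x, b = some x → x.toList.length < (PySem.Str.strip o).toList.length))
    ∨ (pvBStep s b o = b ∧ (pvCand s (PySem.Str.strip o) →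
         ∃ x, b = some x ∧ (PySem.Str.strip o).toList.length ≤ x.toList.length)) := by
  by_cases hc : ((PySem.Str.strip o != "") && PySem.Str.startswith s (PySem.Str.strip o)
       && (match b with | none => true | some x => decide (PySem.Str.len x < PySem.Str.len (PySem.Str.strip o)))) = true
  · left
    have he : pvBStep s b o = some (PySem.Str.strip o) := by
      simp only [pvBStep]; rw [if_pos hc]
    simp only [Bool.and_eq_true, bne_iff_ne, ne_eq] at hc
    refine ⟨he, ⟨hc.1.1, ?_⟩, ?_⟩
    · rw [← PySem.Chars.startswith_iff, ← PySem.Str.startswith_eq]; exact hc.1.2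
    · intro x hx
      subst hx
      have := hc.2
      simp only [PySem.Str.len_eq, decide_eq_true_eq, Nat.cast_lt] at this
      exact this
  · right
    have he : pvBStep s b o = b := by
      simp only [pvBStep]; rw [if_neg hc]
    refine ⟨he, ?_⟩
    rintro ⟨h1, h2⟩
    rw [← PySem.Chars.startswith_iff, ← PySem.Str.startswith_eq] at h2
    cases b with
    | none => exact absurd (by rw [h2]; simp [h1]) hc
    | some x =>
      refine ⟨x, rfl, ?_⟩
      have hd : ¬ (decide (PySem.Str.len x < PySem.Str.len (PySem.Str.strip o)) = true) := by
        intro h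
        apply hc
        rw [h2, show (PySem.Str.strip o != "") = true from by simp [h1]]
        simp only [Bool.true_and]
        exact h
      simp only [PySem.Str.len_eq, decide_eq_true_eq, Nat.cast_lt, not_lt] at hd
      exact hd

theorem pvB_fold (s : String) (l : List String) (b : Option String)
    (hb : ∀ x, b = some x → pvCand s x) :
    (∀ x, l.foldl (pvBStep s) b = some x → pvCand s x)
    ∧ (∀ x, b = some x → ∃ y, l.foldl (pvBStep s) b = some y ∧ x.toList.length ≤ y.toList.length)
    ∧ (∀ o ∈ l, pvCand s (PySem.Str.strip o) →
         ∃ y, l.foldl (pvBStep s) b = some y ∧ (PySem.Str.strip o).toList.length ≤ y.toList.length)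
    ∧ (∀ y, l.foldl (pvBStep s) b = some y → b = some y ∨ ∃ o ∈ l, y = PySem.Str.strip o) := by
  induction l generalizing b with
  | nil =>
    refine ⟨hb, fun x hx => ⟨x, hx, le_refl _⟩, by simp, fun y hy => Or.inl hy⟩
  | cons a rest ih =>
    have hstep := pvBStep_cases s b a
    have hb' : ∀ x, pvBStep s b a = some x → pvCand s x := by
      rcases hstep with ⟨he, hc, _⟩ | ⟨he, _⟩
      · intro x hx; rw [he] at hx; injection hx with hx; exact hx ▸ hc
      · intro x hx; rw [he] at hx; exact hb x hx
    obtain ⟨ih1, ih2, ih3, ih4⟩ := ih (pvBStep s b a) hb'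
    simp only [List.foldl_cons]
    refine ⟨ih1, ?_, ?_, ?_⟩
    · intro x hx
      rcases hstep with ⟨he, hc, hlt⟩ | ⟨he, _⟩
      · obtain ⟨y, hy, hle⟩ := ih2 (PySem.Str.strip a) he
        exact ⟨y, hy, le_trans (le_of_lt (hlt x hx)) hle⟩
      · exact ih2 x (by rw [he]; exact hx)
    · intro o ho hco
      rcases List.mem_cons.mp ho with rfl | ho
      · rcases hstep with ⟨he, hc, _⟩ | ⟨he, hdom⟩
        · exact ih2 (PySem.Str.strip o) he
        · obtain ⟨x, hx, hle⟩ := hdom hco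
          obtain ⟨y, hy, hle'⟩ := ih2 x (by rw [he]; exact hx)
          exact ⟨y, hy, le_trans hle hle'⟩
      · exact ih3 o ho hco
    · intro y hy
      rcases ih4 y hy with h | ⟨o, ho, rfl⟩
      · rcases hstep with ⟨he, _, _⟩ | ⟨he, _⟩
        · rw [he] at h; injection h with h
          exact Or.inr ⟨a, List.mem_cons_self .., h.symm⟩
        · exact Or.inl (he ▸ h)
      · exact Or.inr ⟨o, List.mem_cons_of_mem _ ho, rfl⟩

-- ===== VERDICT (by name: the statement is the Claim_ definition above) =====
set_option maxHeartbeats 1600000 in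
theorem replace_cell_show_text_spec : Claim_equal_replace_cell_show_text := by
  intro text ol nd _
  unfold Spec_replace_cell_show_text replace_cell_show_text replace_cell_show_text_alt
  dsimp only
  obtain ⟨inv1, inv2, inv3, inv4⟩ := pvB_fold text ol none (by simp)
  by_cases hex : ∃ o ∈ ol, pvCand text (PySem.Str.strip o)
  · obtain ⟨o₀, ho₀, hc₀⟩ := hex
    obtain ⟨y, hy, hylen⟩ := inv3 o₀ ho₀ hc₀
    have hcy : pvCand text y := inv1 y hy
    have hymax : ∀ o ∈ ol, pvCand text (PySem.Str.strip o) →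
        (PySem.Str.strip o).toList.length ≤ y.toList.length := by
      intro o ho hc
      obtain ⟨y', hy', hle⟩ := inv3 o ho hc
      rw [hy] at hy'; injection hy' with hy'
      rw [hy']; exact hle
    rw [hy]
    have holds_ne : pvOlds ol ≠ [] :=
      List.ne_nil_of_mem (mem_pvOlds_of_cand text ol o₀ ho₀ hc₀)
    rw [if_neg holds_ne]
    by_cases hmem : text ∈ pvOlds ol
    · rw [pvAExact_some text nd _ hmem]
      dsimp only
      rcases (mem_pvOlds ol text).mp hmem with ⟨o₁, ho₁, ⟨_, hne₁⟩, hts₁⟩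
      have hfull : text.toList.length ≤ y.toList.length := by
        have := hymax o₁ ho₁ (by rw [← hts₁]; exact ⟨hne₁ ∘ (hts₁ ▸ id), List.prefix_refl _⟩)
        rwa [← hts₁] at this
      have hylen' : y.toList.length = text.toList.length :=
        le_antisymm hcy.2.length_le hfull
      rw [hylen', List.drop_length, List.append_nil, String.ofList_toList]
    · rw [pvAExact_none text nd _ hmem]
      dsimp only
      have hexold : ∃ old ∈ pvOlds ol, old.toList <+: text.toList :=
        ⟨PySem.Str.strip o₀, mem_pvOlds_of_cand text ol o₀ ho₀ hc₀, hc₀.2⟩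
      obtain ⟨old, holdmem, holdpre, holdmax, heq⟩ :=
        pvAPrefix_char text nd _ (pvOlds_pairwise ol) hexold
      rw [heq]
      dsimp only
      have h1 : old.toList.length ≤ y.toList.length := by
        rcases (mem_pvOlds ol old).mp holdmem with ⟨o₂, ho₂, ⟨_, hne₂⟩, rfl⟩
        exact hymax o₂ ho₂ ⟨hne₂, holdpre⟩
      have h2 : y.toList.length ≤ old.toList.length := by
        rcases inv4 y hy with h | ⟨o₃, ho₃, rfl⟩
        · simp at h
        · exact holdmax _ (mem_pvOlds_of_cand text ol o₃ ho₃ ⟨hcy.1, hcy.2⟩) hcy.2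
      rw [le_antisymm h1 h2]
  · have hr : ol.foldl (pvBStep text) none = none := by
      cases hfold : ol.foldl (pvBStep text) none with
      | none => rfl
      | some y =>
        rcases inv4 y hfold with h | ⟨o, ho, rfl⟩
        · exact absurd h (by simp)
        · exact absurd ⟨o, ho, inv1 _ hfold⟩ hex
    rw [hr]
    dsimp only
    by_cases hnil : pvOlds ol = []
    · simp [hnil]
    · rw [if_neg hnil]
      have hnotmem : text ∉ pvOlds ol := by
        intro hmem
        rcases (mem_pvOlds ol text).mp hmem with ⟨o, ho, ⟨_, hne⟩, hts⟩
        exact hex ⟨o, ho, ⟨hne, by rw [← hts]⟩⟩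
      rw [pvAExact_none text nd _ hnotmem]
      dsimp only
      have hpre : ∀ old ∈ pvOlds ol, ¬ old.toList <+: text.toList := by
        intro old hold hp
        rcases (mem_pvOlds ol old).mp hold with ⟨o, ho, ⟨_, hne⟩, rfl⟩
        exact hex ⟨o, ho, ⟨hne, hp⟩⟩
      rw [pvAPrefix_none text nd _ hpre]
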